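-- pv_equiv track=rewrite | github.com/cuilimeng/DETERRENT | Healthcare misinformation detection/data.py | get_all_possible_triples
-- ===== SOURCE A (Python) =====
-- def get_all_possible_triples(ref_triples, entities, relations, neg_label=0.):
--     '''
--         根据entities和relations生成全图，并给出对应标注
--         参数:
--             ref_triples: set((h,r,t), ...)
--             entities:    set(e1, e2)
--             relations:   set(r1, r2)
--         返回:
--             full_triples: [(h, r, t), ...]
--             labels:       [1, 0, ...]
--     '''
--
--     full_triples = []
--     for h in entities:
--         for t in entities:
--             if h == t:
--                 continue
--             for r in relations:
--                 if (h, r, t) in ref_triples: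
--                     full_triples.append((h, r, t))
--     return full_triples
-- ===== SOURCE B (Python) =====
-- def get_all_possible_triples(ref_triples, entities, relations, neg_label=0.):
--     # Filter the reference triples directly, then sort by row-major rank of
--     # (entity-index of h, entity-index of t, relation-index of r) to recover
--     # the nested-loop emission order.  O(|E| + |R| + |ref| log |ref|).
--     eidx = {e: i for i, e in enumerate(entities)}
--     ridx = {r: k for k, r in enumerate(relations)}
--     L, K = len(entities), len(relations)
--     cands = [trip for trip in set(ref_triples)
--              if trip[0] != trip[2] and trip[0] in eidx
--              and trip[2] in eidx and trip[1] in ridx]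
--     cands.sort(key=lambda trip: (eidx[trip[0]] * L + eidx[trip[2]]) * K + ridx[trip[1]])
--     return cands
-- ===== Notes on version B (the rewrite author's own statement) =====
-- stated objective: faster
-- what changed: Instead of scanning every (h,t,r) pair of entities x entities x relations and testing membership in ref_triples, B filters the deduplicated ref_triples once against index maps of entities/relations and sorts the survivors by the row-major rank of their (h-index, t-index, r-index), recovering the nested-loop order.
import Mathlib
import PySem

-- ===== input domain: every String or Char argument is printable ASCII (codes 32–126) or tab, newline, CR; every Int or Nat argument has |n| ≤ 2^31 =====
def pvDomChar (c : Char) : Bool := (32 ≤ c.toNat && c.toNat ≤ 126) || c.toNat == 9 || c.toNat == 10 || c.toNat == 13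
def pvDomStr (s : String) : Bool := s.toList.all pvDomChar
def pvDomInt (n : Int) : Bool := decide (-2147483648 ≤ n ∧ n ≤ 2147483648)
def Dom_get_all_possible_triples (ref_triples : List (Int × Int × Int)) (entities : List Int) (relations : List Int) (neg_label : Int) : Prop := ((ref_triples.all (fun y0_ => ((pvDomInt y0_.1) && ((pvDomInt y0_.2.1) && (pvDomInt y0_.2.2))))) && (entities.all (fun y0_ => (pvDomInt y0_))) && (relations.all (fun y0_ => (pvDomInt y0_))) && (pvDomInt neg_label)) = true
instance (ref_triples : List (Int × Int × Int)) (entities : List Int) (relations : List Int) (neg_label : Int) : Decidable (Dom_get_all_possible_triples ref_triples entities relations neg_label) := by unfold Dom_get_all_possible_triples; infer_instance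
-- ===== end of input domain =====

-- B replaces A's entities × entities × relations membership scan by filtering the
-- deduplicated reference triples once against entity/relation index maps and sorting
-- the survivors by the row-major rank of their index triple (objective: faster).

-- ===== PORT A =====
def get_all_possible_triples (ref_triples : List (Int × Int × Int)) (entities : List Int) (relations : List Int) (neg_label : Int) : List (Int × Int × Int) :=
  entities.foldl (fun acc h =>
    entities.foldl (fun acc t =>
      if h = t then acc
      else relations.foldl (fun acc r =>
        if (h, r, t) ∈ ref_triples then acc ++ [(h, r, t)] else acc) acc) acc) []

-- ===== PORT B =====
-- {e: i for i, e in enumerate(l)}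
def pvIdxMap (l : List Int) : PySem.Dict Int Int :=
  (PySem.List.enumerate l 0).foldl (fun d p => d.insert p.2 p.1) PySem.Dict.empty

-- key=lambda trip: (eidx[trip[0]] * L + eidx[trip[2]]) * K + ridx[trip[1]]
def pvRank (eidx ridx : PySem.Dict Int Int) (L K : Int) (tr : Int × Int × Int) : Int :=
  (eidx.getD tr.1 0 * L + eidx.getD tr.2.2 0) * K + ridx.getD tr.2.1 0

def get_all_possible_triples_alt (ref_triples : List (Int × Int × Int)) (entities : List Int) (relations : List Int) (neg_label : Int) : List (Int × Int × Int) :=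
  let eidx := pvIdxMap entities
  let ridx := pvIdxMap relations
  let cands := (PySem.Set.ofList ref_triples).filter
    (fun tr => tr.1 != tr.2.2 && eidx.contains tr.1 && eidx.contains tr.2.2 && ridx.contains tr.2.1)
  PySem.List.sorted cands (pvRank eidx ridx (entities.length : Int) (relations.length : Int))

-- ===== PRECONDITION & SPEC =====
-- Pre_ excludes duplicate entries in entities or relations: these arguments are documented
-- as Python sets, and the multiplicity/interleaving with which A re-emits a triple once per
-- duplicated position is an accidental corner no caller relies on.
def Pre_get_all_possible_triples (ref_triples : List (Int × Int × Int)) (entities : List Int) (relations : List Int) (neg_label : Int) : Prop :=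
  entities.Nodup ∧ relations.Nodup
instance (ref_triples : List (Int × Int × Int)) (entities : List Int) (relations : List Int) (neg_label : Int) : Decidable (Pre_get_all_possible_triples ref_triples entities relations neg_label) := by unfold Pre_get_all_possible_triples; infer_instance

def pvWitness_get_all_possible_triples : (List (Int × Int × Int)) × List Int × List Int × Int :=
  ([(1, 2, 3)], [1, 3], [2], 0)

def Spec_get_all_possible_triples (ref_triples : List (Int × Int × Int)) (entities : List Int) (relations : List Int) (neg_label : Int) (out : List (Int × Int × Int)) : Prop := out = get_all_possible_triples_alt ref_triples entities relations neg_label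
instance (ref_triples : List (Int × Int × Int)) (entities : List Int) (relations : List Int) (neg_label : Int) (out : List (Int × Int × Int)) : Decidable (Spec_get_all_possible_triples ref_triples entities relations neg_label out) := by unfold Spec_get_all_possible_triples; infer_instance

-- ===== CLAIM (what is proved, stated in full; the proofs are below) =====
def Claim_equal_get_all_possible_triples : Prop := ∀ (ref_triples : List (Int × Int × Int)) (entities : List Int) (relations : List Int) (neg_label : Int), Dom_get_all_possible_triples ref_triples entities relations neg_label → Pre_get_all_possible_triples ref_triples entities relations neg_label → Spec_get_all_possible_triples ref_triples entities relations neg_label (get_all_possible_triples ref_triples entities relations neg_label)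

-- ===== LEMMAS AND PROOFS =====

-- A's output, written as nested flatMaps (the canonical lexicographic enumeration).
def pvCanon (ref : List (Int × Int × Int)) (E R : List Int) : List (Int × Int × Int) :=
  E.flatMap (fun h => E.flatMap (fun t =>
    if h = t then []
    else (R.filter (fun r => decide ((h, r, t) ∈ ref))).map (fun r => (h, r, t))))

theorem foldl_skip_append {α β : Type} (p : α → Prop) [DecidablePred p] (g : α → List β)
    (l : List α) (acc : List β) :
    l.foldl (fun acc x => if p x then acc else acc ++ g x) acc
      = acc ++ l.flatMap (fun x => if p x then [] else g x) := by
  induction l generalizing acc with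
  | nil => simp
  | cons x xs ih => by_cases h : p x <;> simp [h, ih]

theorem A_eq_canon (ref : List (Int × Int × Int)) (E R : List Int) (n : Int) :
    get_all_possible_triples ref E R n = pvCanon ref E R := by
  unfold get_all_possible_triples pvCanon
  have hmid : ∀ (h : Int) (acc : List (Int × Int × Int)),
      E.foldl (fun acc t => if h = t then acc
        else R.foldl (fun acc r => if (h, r, t) ∈ ref then acc ++ [(h, r, t)] else acc) acc) acc
      = acc ++ E.flatMap (fun t => if h = t then []
        else (R.filter (fun r => decide ((h, r, t) ∈ ref))).map (fun r => (h, r, t))) := by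
    intro h acc
    have hfun : (fun (acc : List (Int × Int × Int)) t => if h = t then acc
        else R.foldl (fun acc r => if (h, r, t) ∈ ref then acc ++ [(h, r, t)] else acc) acc)
        = fun acc t => if h = t then acc
        else acc ++ (R.filter (fun r => decide ((h, r, t) ∈ ref))).map (fun r => (h, r, t)) := by
      funext acc t
      by_cases he : h = t
      · simp [he]
      · simp only [he, if_false]
        exact PySem.List.foldl_append_ite _ _ R acc
    rw [hfun, foldl_skip_append]
  have houter : (fun (acc : List (Int × Int × Int)) h =>
      E.foldl (fun acc t => if h = t then acc
        else R.foldl (fun acc r => if (h, r, t) ∈ ref then acc ++ [(h, r, t)] else acc) acc) acc)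
      = fun acc h => acc ++ E.flatMap (fun t => if h = t then []
        else (R.filter (fun r => decide ((h, r, t) ∈ ref))).map (fun r => (h, r, t))) := by
    funext acc h; exact hmid h acc
  rw [houter, PySem.List.foldl_append_eq_flatMap]
  simp

theorem mem_pvCanon (ref : List (Int × Int × Int)) (E R : List Int) (x : Int × Int × Int) :
    x ∈ pvCanon ref E R ↔ x.1 ∈ E ∧ x.2.2 ∈ E ∧ x.1 ≠ x.2.2 ∧ x.2.1 ∈ R ∧ x ∈ ref := by
  unfold pvCanon
  simp only [List.mem_flatMap]
  constructor
  · rintro ⟨h, hh, t, ht, hx⟩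
    by_cases he : h = t
    · simp [he] at hx
    · simp only [he, if_false, List.mem_map, List.mem_filter, decide_eq_true_eq] at hx
      obtain ⟨r, ⟨hr, hmem⟩, rfl⟩ := hx
      exact ⟨hh, ht, he, hr, hmem⟩
  · rintro ⟨h1, h2, hne, hr, hmem⟩
    refine ⟨x.1, h1, x.2.2, h2, ?_⟩
    simp only [hne, if_false, List.mem_map, List.mem_filter, decide_eq_true_eq]
    exact ⟨x.2.1, ⟨hr, by simpa using hmem⟩, rfl⟩

theorem foldl_insert_getD_not_mem (ps : List (Int × Int)) (d : PySem.Dict Int Int) (e : Int)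
    (h : ∀ p ∈ ps, p.2 ≠ e) :
    (ps.foldl (fun d p => d.insert p.2 p.1) d).getD e 0 = d.getD e 0 := by
  induction ps generalizing d with
  | nil => rfl
  | cons q qs ih =>
    simp only [List.foldl_cons]
    rw [ih _ (fun p hp => h p (List.mem_cons_of_mem _ hp))]
    exact PySem.Dict.getD_insert_of_ne _ _ _ (fun he => h q List.mem_cons_self he.symm) |>.symm ▸ rfl

theorem getD_enumFold (l : List Int) (s : Int) (d : PySem.Dict Int Int) (hnd : l.Nodup)
    (e : Int) (he : e ∈ l) :
    ((PySem.List.enumerate l s).foldl (fun d p => d.insert p.2 p.1) d).getD e 0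
      = s + (l.idxOf e : Int) := by
  induction l generalizing s d with
  | nil => cases he
  | cons x xs ih =>
    obtain ⟨hx, hxs⟩ := List.nodup_cons.mp hnd
    rw [PySem.List.enumerate_cons]
    simp only [List.foldl_cons]
    by_cases hex : e = x
    · subst hex
      rw [foldl_insert_getD_not_mem]
      · rw [PySem.Dict.getD_insert_self, List.idxOf_cons_self]
        simp
      · intro p hp hpe
        obtain ⟨k, hk, rfl⟩ := (PySem.List.mem_enumerate_iff xs (s + 1) p).mp hp
        exact hx (hpe ▸ List.getElem_mem hk)
    · have hexs : e ∈ xs := by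
        rcases List.mem_cons.mp he with h | h
        · exact absurd h hex
        · exact h
      rw [ih (s + 1) _ hxs hexs, List.idxOf_cons_ne _ (Ne.symm hex)]
      push_cast
      ring

theorem getD_pvIdxMap (l : List Int) (hnd : l.Nodup) (e : Int) (he : e ∈ l) :
    (pvIdxMap l).getD e 0 = (l.idxOf e : Int) := by
  unfold pvIdxMap
  rw [getD_enumFold l 0 _ hnd e he]
  ring

theorem contains_pvIdxMap (l : List Int) (e : Int) :
    (pvIdxMap l).contains e = true ↔ e ∈ l := by
  unfold pvIdxMap
  rw [PySem.Dict.contains_iff_mem_keys,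
      show (List.foldl (fun d (p : Int × Int) => d.insert p.2 p.1) PySem.Dict.empty
          (PySem.List.enumerate l 0)).keys
        = PySem.Set.update (PySem.Dict.empty : PySem.Dict Int Int).keys
            ((PySem.List.enumerate l 0).map (fun p => p.2))
        from PySem.Dict.keys_foldl_insert_key _ _ _ _,
      PySem.List.map_snd_enumerate, PySem.Dict.keys_empty]
  exact PySem.Set.mem_ofList l e

theorem nodup_pairwise_idxOf (l : List Int) (h : l.Nodup) :
    l.Pairwise (fun a b => l.idxOf a < l.idxOf b) := by
  induction l with
  | nil => exact List.Pairwise.nil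
  | cons x xs ih =>
    obtain ⟨hx, hxs⟩ := List.nodup_cons.mp h
    constructor
    · intro b hb
      have hbx : b ≠ x := fun e => hx (e ▸ hb)
      rw [List.idxOf_cons_self, List.idxOf_cons_ne _ (Ne.symm hbx)]
      exact Nat.succ_pos _
    · refine (ih hxs).imp_of_mem ?_
      intro a b ha hb hlt
      have hax : a ≠ x := fun e => hx (e ▸ ha)
      have hbx : b ≠ x := fun e => hx (e ▸ hb)
      rw [List.idxOf_cons_ne _ (Ne.symm hax), List.idxOf_cons_ne _ (Ne.symm hbx)]
      exact Nat.succ_lt_succ hlt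

theorem rank_step (m1 m2 k1 k2 K : ℕ) (h : m1 < m2) (hk1 : k1 < K) :
    m1 * K + k1 < m2 * K + k2 := by
  calc m1 * K + k1 < m1 * K + K := by omega
    _ = (m1 + 1) * K := by ring
    _ ≤ m2 * K := Nat.mul_le_mul_right _ h
    _ ≤ m2 * K + k2 := Nat.le_add_right _ _

theorem rank_lt (L K i1 j1 k1 i2 j2 k2 : ℕ)
    (hj1 : j1 < L) (hk1 : k1 < K) (hj2 : j2 < L) (hk2 : k2 < K)
    (hlex : i1 < i2 ∨ (i1 = i2 ∧ (j1 < j2 ∨ (j1 = j2 ∧ k1 < k2)))) :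
    (i1 * L + j1) * K + k1 < (i2 * L + j2) * K + k2 := by
  rcases hlex with hi | ⟨rfl, hj | ⟨rfl, hk⟩⟩
  · exact rank_step _ _ _ _ _ (rank_step _ _ _ _ _ hi hj1) hk1
  · exact rank_step _ _ _ _ _ (by omega) hk1
  · omega

-- the lexicographic index order on triples drawn from E, E, R
def pvLex (E R : List Int) (a b : Int × Int × Int) : Prop :=
  E.idxOf a.1 < E.idxOf b.1 ∨ (a.1 = b.1 ∧
    (E.idxOf a.2.2 < E.idxOf b.2.2 ∨ (a.2.2 = b.2.2 ∧ R.idxOf a.2.1 < R.idxOf b.2.1)))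

theorem pairwise_lex_pvCanon (ref : List (Int × Int × Int)) (E R : List Int)
    (hE : E.Nodup) (hR : R.Nodup) :
    (pvCanon ref E R).Pairwise (pvLex E R) := by
  unfold pvCanon
  rw [List.pairwise_flatMap]
  constructor
  · intro h _
    rw [List.pairwise_flatMap]
    constructor
    · intro t _
      by_cases he : h = t
      · simp [he]
      · simp only [he, if_false, List.pairwise_map]
        refine (List.Pairwise.sublist List.filter_sublist (nodup_pairwise_idxOf R hR)).imp ?_
        intro r r' hlt
        exact Or.inr ⟨rfl, Or.inr ⟨rfl, hlt⟩⟩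
    · refine (nodup_pairwise_idxOf E hE).imp ?_
      intro t1 t2 hlt x hx y hy
      by_cases he1 : h = t1
      · simp [he1] at hx
      · by_cases he2 : h = t2
        · simp [he2] at hy
        · simp only [he1, he2, if_false, List.mem_map, List.mem_filter] at hx hy
          obtain ⟨r1, _, rfl⟩ := hx
          obtain ⟨r2, _, rfl⟩ := hy
          exact Or.inr ⟨rfl, Or.inl hlt⟩
  · refine (nodup_pairwise_idxOf E hE).imp ?_
    intro h1 h2 hlt x hx y hy
    simp only [List.mem_flatMap] at hx hy
    obtain ⟨t1, _, hx⟩ := hx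
    obtain ⟨t2, _, hy⟩ := hy
    by_cases he1 : h1 = t1
    · simp [he1] at hx
    · by_cases he2 : h2 = t2
      · simp [he2] at hy
      · simp only [he1, he2, if_false, List.mem_map, List.mem_filter] at hx hy
        obtain ⟨r1, _, rfl⟩ := hx
        obtain ⟨r2, _, rfl⟩ := hy
        exact Or.inl hlt

theorem pairwise_rank_pvCanon (ref : List (Int × Int × Int)) (E R : List Int)
    (hE : E.Nodup) (hR : R.Nodup) :
    (pvCanon ref E R).Pairwise (fun a b =>
      pvRank (pvIdxMap E) (pvIdxMap R) (E.length : Int) (R.length : Int) a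
        < pvRank (pvIdxMap E) (pvIdxMap R) (E.length : Int) (R.length : Int) b) := by
  refine (pairwise_lex_pvCanon ref E R hE hR).imp_of_mem ?_
  intro a b ha hb hlex
  obtain ⟨ha1, ha22, _, ha21, _⟩ := (mem_pvCanon ref E R a).mp ha
  obtain ⟨hb1, hb22, _, hb21, _⟩ := (mem_pvCanon ref E R b).mp hb
  unfold pvRank
  rw [getD_pvIdxMap E hE _ ha1, getD_pvIdxMap E hE _ ha22, getD_pvIdxMap R hR _ ha21,
      getD_pvIdxMap E hE _ hb1, getD_pvIdxMap E hE _ hb22, getD_pvIdxMap R hR _ hb21]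
  have h := rank_lt E.length R.length (E.idxOf a.1) (E.idxOf a.2.2) (R.idxOf a.2.1)
      (E.idxOf b.1) (E.idxOf b.2.2) (R.idxOf b.2.1)
      (List.idxOf_lt_length_of_mem ha22) (List.idxOf_lt_length_of_mem ha21)
      (List.idxOf_lt_length_of_mem hb22) (List.idxOf_lt_length_of_mem hb21) ?_
  · exact_mod_cast h
  · rcases hlex with h1 | ⟨he, h2 | ⟨he2, h3⟩⟩
    · exact Or.inl h1
    · exact Or.inr ⟨by rw [he], Or.inl h2⟩
    · exact Or.inr ⟨by rw [he], Or.inr ⟨by rw [he2], h3⟩⟩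

theorem nodup_pvCanon (ref : List (Int × Int × Int)) (E R : List Int)
    (hE : E.Nodup) (hR : R.Nodup) : (pvCanon ref E R).Nodup := by
  refine (pairwise_rank_pvCanon ref E R hE hR).imp ?_
  intro a b hlt rfl
  exact absurd hlt (lt_irrefl _)

theorem perm_pvCanon_cands (ref : List (Int × Int × Int)) (E R : List Int)
    (hE : E.Nodup) (hR : R.Nodup) :
    (pvCanon ref E R).Perm ((PySem.Set.ofList ref).filter
      (fun tr => tr.1 != tr.2.2 && (pvIdxMap E).contains tr.1
        && (pvIdxMap E).contains tr.2.2 && (pvIdxMap R).contains tr.2.1)) := by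
  rw [List.perm_ext_iff_of_nodup (nodup_pvCanon ref E R hE hR)
    ((PySem.Set.nodup_ofList ref).filter _)]
  intro a
  rw [mem_pvCanon, List.mem_filter, PySem.Set.mem_ofList]
  simp only [Bool.and_eq_true, bne_iff_ne, contains_pvIdxMap]
  tauto

-- ===== VERDICT (by name: the statement is the Claim_ definition above) =====
theorem get_all_possible_triples_spec : Claim_equal_get_all_possible_triples := by
  intro ref E R n _ hpre
  obtain ⟨hE, hR⟩ := hpre
  unfold Spec_get_all_possible_triples get_all_possible_triples_alt
  rw [A_eq_canon]
  exact (PySem.List.sorted_eq_of_perm_of_pairwise_lt _ _ _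
    (perm_pvCanon_cands ref E R hE hR) (pairwise_rank_pvCanon ref E R hE hR)).symm
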